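-- pv_equiv track=rewrite | github.com/yashika232/ClipGen | NEW/core/frontend_integration_api.py | _get_current_stage
-- ===== SOURCE A (Python) =====
-- from typing import Dict, Any, Optional, List, Union
--
-- def _get_current_stage(stages: Dict[str, Any]) -> Optional[str]:
--     """Get current processing stage."""
--     for stage_name, stage_data in stages.items():
--         if stage_data.get('status') == 'processing':
--             return stage_name
--
--     # Find next pending stage
--     for stage_name, stage_data in stages.items():
--         if stage_data.get('status') == 'pending':
--             return stage_name
--
--     return None
-- ===== SOURCE B (Python) =====
-- def _get_current_stage(stages):
--     """Get current processing stage (single pass with a first-pending accumulator)."""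
--     first_pending = None
--     for stage_name, stage_data in stages.items():
--         status = stage_data.get('status')
--         if status == 'processing':
--             return stage_name
--         if status == 'pending' and first_pending is None:
--             first_pending = stage_name
--     return first_pending
-- ===== Notes on version B (the rewrite author's own statement) =====
-- stated objective: alternative
-- what changed: Replaces A's two sequential scans over stages.items() with a single pass that returns immediately on the first 'processing' stage and carries the first 'pending' stage in an accumulator as the fallback.
import Mathlib
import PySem

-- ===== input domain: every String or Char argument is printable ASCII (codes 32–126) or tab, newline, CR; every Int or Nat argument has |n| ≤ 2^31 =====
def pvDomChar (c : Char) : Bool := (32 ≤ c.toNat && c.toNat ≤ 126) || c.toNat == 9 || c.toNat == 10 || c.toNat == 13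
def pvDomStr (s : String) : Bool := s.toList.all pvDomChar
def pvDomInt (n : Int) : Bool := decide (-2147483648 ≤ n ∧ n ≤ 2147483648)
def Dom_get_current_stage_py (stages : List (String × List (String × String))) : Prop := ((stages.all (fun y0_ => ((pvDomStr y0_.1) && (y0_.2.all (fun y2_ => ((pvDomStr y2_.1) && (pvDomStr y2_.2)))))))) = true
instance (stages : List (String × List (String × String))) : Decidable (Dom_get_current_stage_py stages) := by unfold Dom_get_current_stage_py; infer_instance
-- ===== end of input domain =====

-- B collapses A's two sequential scans into one pass that returns the first 'processing'
-- stage immediately and keeps the first 'pending' stage in an accumulator as fallback.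


-- ===== PORT A =====
-- A's first loop / second loop: return the first stage whose data.get('status') == status
def pvScanA (status : String) : List (String × List (String × String)) → Option String
  | [] => none
  | (name, data) :: rest =>
    if (PySem.Dict.mk data).get? "status" = some status then some name
    else pvScanA status rest

def get_current_stage_py (stages : List (String × List (String × String))) : Option String :=
  match pvScanA "processing" stages with
  | some name => some name
  | none =>
    match pvScanA "pending" stages with
    | some name => some name
    | none => none

-- ===== PORT B =====
-- single loop carrying the first_pending accumulator
def pvLoopB : List (String × List (String × String)) → Option String → Option String
  | [], firstPending => firstPending
  | (name, data) :: rest, firstPending =>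
    let status := (PySem.Dict.mk data).get? "status"
    if status = some "processing" then some name
    else pvLoopB rest
      (if status = some "pending" ∧ firstPending = none then some name else firstPending)

def get_current_stage_py_alt (stages : List (String × List (String × String))) : Option String :=
  pvLoopB stages none

-- ===== PRECONDITION & SPEC =====
def Spec_get_current_stage_py (stages : List (String × List (String × String))) (out : Option String) : Prop := out = get_current_stage_py_alt stages
instance (stages : List (String × List (String × String))) (out : Option String) : Decidable (Spec_get_current_stage_py stages out) := by unfold Spec_get_current_stage_py; infer_instance

-- ===== CLAIM (what is proved, stated in full; the proofs are below) =====
def Claim_equal_get_current_stage_py : Prop := ∀ (stages : List (String × List (String × String))), Dom_get_current_stage_py stages → Spec_get_current_stage_py stages (get_current_stage_py stages)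

-- ===== LEMMAS AND PROOFS =====
-- invariant of B's loop: return first 'processing' if any, else the accumulator, else first 'pending'
theorem pvLoopB_eq (stages : List (String × List (String × String))) (fp : Option String) :
    pvLoopB stages fp =
      match pvScanA "processing" stages with
      | some name => some name
      | none => match fp with
        | some name => some name
        | none => pvScanA "pending" stages := by
  induction stages generalizing fp with
  | nil => cases fp <;> simp [pvLoopB, pvScanA]
  | cons hd tl ih =>
    obtain ⟨name, data⟩ := hd
    simp only [pvLoopB, pvScanA]
    by_cases hp : (PySem.Dict.mk data).get? "status" = some "processing"
    · simp [hp]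
    · by_cases hq : (PySem.Dict.mk data).get? "status" = some "pending"
      · cases fp <;> simp [hp, hq, ih]
      · cases fp <;> simp [hp, hq, ih]

-- ===== VERDICT (by name: the statement is the Claim_ definition above) =====
theorem get_current_stage_py_spec : Claim_equal_get_current_stage_py := by
  intro stages _
  unfold Spec_get_current_stage_py get_current_stage_py get_current_stage_py_alt
  rw [pvLoopB_eq]
  cases pvScanA "processing" stages <;> cases pvScanA "pending" stages <;> simp
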